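-- pv_equiv track=rewrite | github.com/kairyu33/atcoder | ABC087b-2.py | loop2
-- ===== SOURCE A (Python) =====
-- def loop2(B, C, D):
--     count = 0
--     for b in range(0, B + 1):
--         for c in range(0, C + 1):
--             amount = 100 * b + 50 * c
--             if amount == D:
--                 count += 1
--     return count
-- ===== SOURCE B (Python) =====
-- def loop2(B, C, D):
--     # closed form: solutions of 2b + c = D/50 with 0<=b<=B, 0<=c<=C
--     if D < 0 or D % 50 != 0 or B < 0 or C < 0:
--         return 0
--     k = D // 50
--     lo = max(0, -((C - k) // 2))   # smallest feasible b: ceil((k-C)/2)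
--     hi = min(B, k // 2)            # largest feasible b
--     return max(0, hi - lo + 1)
-- ===== Notes on version B (the rewrite author's own statement) =====
-- stated objective: faster
-- what changed: Replaces the O(B*C) double loop by a loop-free closed form: solutions of 2b+c=D/50 are the b in an integer interval, so the count is max(0, min(B,k//2) - max(0,ceil((k-C)/2)) + 1).
import Mathlib
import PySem

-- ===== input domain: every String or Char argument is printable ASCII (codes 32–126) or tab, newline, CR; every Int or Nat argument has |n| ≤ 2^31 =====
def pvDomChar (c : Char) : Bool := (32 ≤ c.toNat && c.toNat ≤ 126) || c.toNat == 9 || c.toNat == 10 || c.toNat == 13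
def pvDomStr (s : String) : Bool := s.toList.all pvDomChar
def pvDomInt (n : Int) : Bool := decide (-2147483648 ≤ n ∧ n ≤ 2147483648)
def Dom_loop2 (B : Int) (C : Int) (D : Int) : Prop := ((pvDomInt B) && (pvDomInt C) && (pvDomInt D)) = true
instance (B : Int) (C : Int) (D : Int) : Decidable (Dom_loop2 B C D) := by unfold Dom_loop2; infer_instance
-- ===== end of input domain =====

-- B replaces A's double loop by a loop-free closed form counting b in an interval: O(1) instead of O(B*C).

-- ===== PORT A =====
def loop2 (B : Int) (C : Int) (D : Int) : Int :=
  (PySem.List.pyRange 0 (B + 1) 1).foldl (fun count b =>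
    (PySem.List.pyRange 0 (C + 1) 1).foldl (fun count c =>
      let amount := 100 * b + 50 * c
      if amount = D then count + 1 else count) count) 0

-- ===== PORT B =====
def loop2_alt (B : Int) (C : Int) (D : Int) : Int :=
  if D < 0 ∨ PySem.Int.mod D 50 ≠ 0 ∨ B < 0 ∨ C < 0 then 0
  else
    let k := PySem.Int.floordiv D 50
    let lo := max 0 (-(PySem.Int.floordiv (C - k) 2))
    let hi := min B (PySem.Int.floordiv k 2)
    max 0 (hi - lo + 1)

-- ===== PRECONDITION & SPEC =====
def Spec_loop2 (B : Int) (C : Int) (D : Int) (out : Int) : Prop := out = loop2_alt B C D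
instance (B : Int) (C : Int) (D : Int) (out : Int) : Decidable (Spec_loop2 B C D out) := by unfold Spec_loop2; infer_instance

-- ===== CLAIM (what is proved, stated in full; the proofs are below) =====
def Claim_equal_loop2 : Prop := ∀ (B : Int) (C : Int) (D : Int), Dom_loop2 B C D → Spec_loop2 B C D (loop2 B C D)

-- ===== LEMMAS AND PROOFS =====

-- A's inner loop, starting from acc, adds 1 exactly when some c in [0,C] solves 100b+50c=D.
lemma inner_loop_eq (b C D acc : Int) :
    (PySem.List.pyRange 0 (C + 1) 1).foldl (fun count c =>
      let amount := 100 * b + 50 * c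
      if amount = D then count + 1 else count) acc
    = acc + (if D - 100 * b ≥ 0 ∧ (D - 100 * b) % 50 = 0 ∧ (D - 100 * b) / 50 ≤ C then 1 else 0) := by
  induction C using Int.induction_on generalizing acc with
  | zero =>
      simp only [PySem.List.pyRange_one_singleton, List.foldl_cons, List.foldl_nil]
      split_ifs <;> omega
  | succ k ih =>
      rw [PySem.List.pyRange_one_succ_right (by positivity), List.foldl_append]
      rw [ih]
      simp only [List.foldl_cons, List.foldl_nil]
      split_ifs <;> omega
  | pred k _ =>
      rw [PySem.List.pyRange_one_eq_nil (by omega)]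
      simp only [List.foldl_nil]
      split_ifs <;> omega

-- the closed form, written with Lean's ediv/emod (divisors are positive)
def pvClosed (B C D : Int) : Int :=
  if D < 0 ∨ D % 50 ≠ 0 ∨ B < 0 ∨ C < 0 then 0
  else max 0 (min B (D / 50 / 2) - max 0 (-((C - D / 50) / 2)) + 1)

-- A's outer loop, starting from acc, accumulates the closed-form count.
lemma outer_loop_eq (B C D acc : Int) :
    (PySem.List.pyRange 0 (B + 1) 1).foldl (fun count b =>
      (PySem.List.pyRange 0 (C + 1) 1).foldl (fun count c =>
        let amount := 100 * b + 50 * c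
        if amount = D then count + 1 else count) count) acc
    = acc + pvClosed B C D := by
  induction B using Int.induction_on generalizing acc with
  | zero =>
      simp only [PySem.List.pyRange_one_singleton, List.foldl_cons, List.foldl_nil]
      rw [inner_loop_eq]
      unfold pvClosed
      split_ifs <;> omega
  | succ k ih =>
      rw [show PySem.List.pyRange 0 ((k : Int) + 1 + 1) 1
            = PySem.List.pyRange 0 ((k : Int) + 1) 1 ++ [(k : Int) + 1] from
          PySem.List.pyRange_one_succ_right (by positivity), List.foldl_append]
      rw [ih]
      simp only [List.foldl_cons, List.foldl_nil]
      rw [inner_loop_eq]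
      unfold pvClosed
      split_ifs <;> omega
  | pred k _ =>
      rw [show PySem.List.pyRange 0 (-(k : Int) - 1 + 1) 1 = [] from
          PySem.List.pyRange_one_eq_nil (by omega)]
      simp only [List.foldl_nil]
      unfold pvClosed
      split_ifs <;> omega

lemma alt_eq_closed (B C D : Int) : loop2_alt B C D = pvClosed B C D := by
  unfold loop2_alt pvClosed
  simp only [show ∀ m : Int, PySem.Int.mod m 50 = m % 50 from
               fun _ => PySem.Int.mod_eq_emod_of_pos (by norm_num),
             show ∀ m : Int, PySem.Int.floordiv m 50 = m / 50 from
               fun _ => PySem.Int.floordiv_eq_ediv_of_pos (by norm_num),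
             show ∀ m : Int, PySem.Int.floordiv m 2 = m / 2 from
               fun _ => PySem.Int.floordiv_eq_ediv_of_pos (by norm_num)]

-- ===== VERDICT (by name: the statement is the Claim_ definition above) =====
theorem loop2_spec : Claim_equal_loop2 := by
  intro B C D _
  unfold Spec_loop2 loop2
  rw [outer_loop_eq, alt_eq_closed]
  omega
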